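-- pv_equiv track=rewrite | github.com/KristofferSandvang/AdventOfCode2023 | dec2/dec2.py | fewestCubesNeeded
-- ===== SOURCE A (Python) =====
-- def fewestCubesNeeded(cubeCombinations: list) -> list:
--     minRed = 0
--     minGreen = 0
--     minBlue = 0
--     for cubeCombination in cubeCombinations:
--         if (minRed < cubeCombination[0]):
--             minRed = cubeCombination[0]
--         if (minGreen < cubeCombination[1]):
--             minGreen = cubeCombination[1]
--         if (minBlue < cubeCombination[2]):
--             minBlue = cubeCombination[2]
--     return [minRed, minGreen, minBlue]
-- ===== SOURCE B (Python) =====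
-- def fewestCubesNeeded(cubeCombinations: list) -> list:
--     # Divide-and-conquer: split the rows in half, solve each half recursively,
--     # merge by componentwise max; empty range yields (0, 0, 0).
--     def solve(lo, hi):
--         if lo == hi:
--             return (0, 0, 0)
--         if hi - lo == 1:
--             c = cubeCombinations[lo]
--             return (max(0, c[0]), max(0, c[1]), max(0, c[2]))
--         mid = (lo + hi) // 2
--         l = solve(lo, mid)
--         r = solve(mid, hi)
--         return (max(l[0], r[0]), max(l[1], r[1]), max(l[2], r[2]))
--     t = solve(0, len(cubeCombinations))
--     return [t[0], t[1], t[2]]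
-- ===== Notes on version B (the rewrite author's own statement) =====
-- stated objective: alternative
-- what changed: Replaces A's single left-to-right pass updating three running maxima with a recursive divide-and-conquer: the row range is split in half, each half solved recursively, and results merged by componentwise max (correct since max is associative-commutative with the 0 seed as floor).
import Mathlib
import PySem

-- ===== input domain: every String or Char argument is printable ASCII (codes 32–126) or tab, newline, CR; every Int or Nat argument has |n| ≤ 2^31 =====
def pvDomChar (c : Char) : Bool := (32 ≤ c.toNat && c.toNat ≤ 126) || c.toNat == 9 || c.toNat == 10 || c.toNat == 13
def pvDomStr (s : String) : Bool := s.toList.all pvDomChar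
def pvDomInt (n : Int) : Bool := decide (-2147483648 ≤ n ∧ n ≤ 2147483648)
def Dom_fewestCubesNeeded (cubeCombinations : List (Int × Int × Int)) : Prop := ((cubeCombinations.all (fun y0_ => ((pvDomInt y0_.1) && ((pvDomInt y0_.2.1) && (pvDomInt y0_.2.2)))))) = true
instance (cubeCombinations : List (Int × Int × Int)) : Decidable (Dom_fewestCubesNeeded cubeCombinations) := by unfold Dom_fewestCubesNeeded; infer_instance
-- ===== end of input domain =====

-- B replaces A's single accumulator pass with a recursive divide-and-conquer
-- (split in half, merge componentwise maxima) — an alternative decomposition, same cost.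


-- ===== PORT A =====
-- literal transliteration: one loop over rows updating (minRed, minGreen, minBlue)
def fewestCubesNeeded (cubeCombinations : List (Int × Int × Int)) : List Int :=
  let st := cubeCombinations.foldl
    (fun (acc : Int × Int × Int) c =>
      let minRed := if acc.1 < c.1 then c.1 else acc.1
      let minGreen := if acc.2.1 < c.2.1 then c.2.1 else acc.2.1
      let minBlue := if acc.2.2 < c.2.2 then c.2.2 else acc.2.2
      (minRed, minGreen, minBlue))
    (0, 0, 0)
  [st.1, st.2.1, st.2.2]

-- ===== PORT B =====
-- divide and conquer on the list of rows (Source B's solve over index ranges becomes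
-- recursion on take/drop halves of the sublist, the same values at every call)
def solveDC (xs : List (Int × Int × Int)) : Int × Int × Int :=
  match xs with
  | [] => (0, 0, 0)
  | [c] => (max 0 c.1, max 0 c.2.1, max 0 c.2.2)
  | a :: b :: t =>
      let n := (a :: b :: t).length / 2
      let l := solveDC ((a :: b :: t).take n)
      let r := solveDC ((a :: b :: t).drop n)
      (max l.1 r.1, max l.2.1 r.2.1, max l.2.2 r.2.2)
termination_by xs.length
decreasing_by
  · simp [List.length_take]; omega
  · simp [List.length_drop]; omega

def fewestCubesNeeded_alt (cubeCombinations : List (Int × Int × Int)) : List Int :=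
  let t := solveDC cubeCombinations
  [t.1, t.2.1, t.2.2]

-- ===== PRECONDITION & SPEC =====
def Spec_fewestCubesNeeded (cubeCombinations : List (Int × Int × Int)) (out : List Int) : Prop := out = fewestCubesNeeded_alt cubeCombinations
instance (cubeCombinations : List (Int × Int × Int)) (out : List Int) : Decidable (Spec_fewestCubesNeeded cubeCombinations out) := by unfold Spec_fewestCubesNeeded; infer_instance

-- ===== CLAIM (what is proved, stated in full; the proofs are below) =====
def Claim_equal_fewestCubesNeeded : Prop := ∀ (cubeCombinations : List (Int × Int × Int)), Dom_fewestCubesNeeded cubeCombinations → Spec_fewestCubesNeeded cubeCombinations (fewestCubesNeeded cubeCombinations)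

-- ===== LEMMAS AND PROOFS =====

theorem foldl_max_shift (l : List Int) (a b : Int) :
    l.foldl max (max a b) = max a (l.foldl max b) := by
  induction l generalizing b with
  | nil => rfl
  | cons h t ih => simp only [List.foldl_cons, max_assoc, ih]

theorem foldl_max_append (A B : List Int) :
    (A ++ B).foldl max (0 : Int) = max (A.foldl max 0) (B.foldl max 0) := by
  rw [List.foldl_append]
  have h0 : A.foldl max (0 : Int) = max (A.foldl max 0) 0 := by
    have h := foldl_max_shift A 0 0
    simp only [max_self] at h
    rw [max_comm, ← h]
  calc B.foldl max (A.foldl max (0 : Int))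
      = B.foldl max (max (A.foldl max 0) 0) := by rw [← h0]
    _ = max (A.foldl max 0) (B.foldl max 0) := foldl_max_shift B _ 0

-- characterisation of B's divide-and-conquer: componentwise max over the columns
theorem solveDC_eq (xs : List (Int × Int × Int)) :
    solveDC xs = ((xs.map (·.1)).foldl max 0,
                  (xs.map (·.2.1)).foldl max 0,
                  (xs.map (·.2.2)).foldl max 0) := by
  induction xs using solveDC.induct with
  | case1 => simp [solveDC]
  | case2 c => simp [solveDC]
  | case3 a b t n ihl ihr =>
      rw [solveDC]
      rw [ihl, ihr]
      have hsplit : (a :: b :: t).take ((a :: b :: t).length / 2) ++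
                    (a :: b :: t).drop ((a :: b :: t).length / 2) = a :: b :: t :=
        List.take_append_drop _ _
      have key : ∀ f : (Int × Int × Int) → Int,
          max ((((a :: b :: t).take ((a :: b :: t).length / 2)).map f).foldl max 0)
              ((((a :: b :: t).drop ((a :: b :: t).length / 2)).map f).foldl max 0)
          = ((a :: b :: t).map f).foldl max 0 := by
        intro f
        rw [← foldl_max_append, ← List.map_append, hsplit]
      exact Prod.ext (key _) (Prod.ext (key _) (key _))

-- the A-side triple fold splits into three component-wise max folds
theorem triple_fold_split (xs : List (Int × Int × Int)) (a b c : Int) :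
    xs.foldl
      (fun (acc : Int × Int × Int) p =>
        (if acc.1 < p.1 then p.1 else acc.1,
         if acc.2.1 < p.2.1 then p.2.1 else acc.2.1,
         if acc.2.2 < p.2.2 then p.2.2 else acc.2.2))
      (a, b, c)
    = ((xs.map (·.1)).foldl max a,
       (xs.map (·.2.1)).foldl max b,
       (xs.map (·.2.2)).foldl max c) := by
  induction xs generalizing a b c with
  | nil => rfl
  | cons h t ih =>
      simp only [List.foldl_cons, List.map_cons]
      rw [ih]
      have m : ∀ u v : Int, (if u < v then v else u) = max u v := by
        intro u v; rw [max_def]; split_ifs <;> omega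
      rw [m, m, m]

-- ===== VERDICT (by name: the statement is the Claim_ definition above) =====
theorem fewestCubesNeeded_spec : Claim_equal_fewestCubesNeeded := by
  intro xs _
  unfold Spec_fewestCubesNeeded fewestCubesNeeded fewestCubesNeeded_alt
  rw [solveDC_eq, triple_fold_split]
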